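-- pv_equiv track=rewrite | github.com/homebrew9/leetcode_solutions | algorithms/medium/maximum_coins_heroes_can_collect.py | maximumCoins_1
-- ===== SOURCE A (Python) =====
-- from typing import List
--
-- def maximumCoins_1(heroes: List[int], monsters: List[int], coins: List[int]) -> List[int]:
--     '''
--         mc = [(1,2), (1,3), (2,5), (3,6), (5,4)]
--     '''
--     monsters_coins = sorted([(m, c) for m, c in zip(monsters, coins)])
--     mlist = [m for m, c in monsters_coins]
--     clist = [c for m, c in monsters_coins]
--     pfx = [0 for _ in range(len(clist))]
--     for i in range(len(clist)):
--         pfx[i] = (0 if i == 0 else pfx[i-1]) + clist[i]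
--     res = list()
--     for i, v in enumerate(heroes):
--         left, right = 0, len(mlist) - 1
--         while left <= right:
--             mid = (left + right) // 2
--             if mlist[mid] <= v:
--                 left = mid + 1
--             else:
--                 right = mid - 1
--         ind = left
--         #ind = bisect.bisect_right(mlist, v)
--         if left == 0:
--             res += [0]
--         else:
--             res += [pfx[left-1]]
--     return res
-- ===== SOURCE B (Python) =====
-- from typing import List
--
-- def maximumCoins_1(heroes: List[int], monsters: List[int], coins: List[int]) -> List[int]:
--     # For each hero, directly sum the coins of the monsters it can defeat.
--     return [sum(c for m, c in zip(monsters, coins) if m <= v) for v in heroes]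
-- ===== Notes on version B (the rewrite author's own statement) =====
-- stated objective: simpler
-- what changed: Replaced the sort + prefix-sum table + hand-written binary search with a single comprehension that, for each hero, sums the coins of monsters whose power is <= the hero's power directly over zip(monsters, coins).
import Mathlib
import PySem

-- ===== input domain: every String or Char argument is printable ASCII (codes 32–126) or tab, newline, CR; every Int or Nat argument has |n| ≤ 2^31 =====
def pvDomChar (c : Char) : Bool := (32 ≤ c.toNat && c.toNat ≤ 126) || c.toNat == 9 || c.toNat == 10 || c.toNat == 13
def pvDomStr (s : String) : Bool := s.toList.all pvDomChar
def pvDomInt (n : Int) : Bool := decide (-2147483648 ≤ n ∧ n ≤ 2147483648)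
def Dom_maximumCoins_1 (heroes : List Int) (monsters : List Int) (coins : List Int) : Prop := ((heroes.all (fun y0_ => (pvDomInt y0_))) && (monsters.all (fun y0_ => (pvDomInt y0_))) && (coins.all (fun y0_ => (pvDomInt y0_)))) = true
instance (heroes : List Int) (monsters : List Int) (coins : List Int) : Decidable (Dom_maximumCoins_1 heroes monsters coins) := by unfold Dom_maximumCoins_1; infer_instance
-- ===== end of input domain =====

-- B replaces A's sort + prefix-sum table + hand-written binary search by a direct
-- per-hero filtered sum over zip(monsters, coins): simpler, not faster.

-- ===== PORT A =====

-- the 'for i in range(len(clist))' prefix-sum loop: each step stores (previous pfx entry, 0 at i=0) + clist[i]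
def pvPfx : List Int → Int → List Int
  | [], _ => []
  | c :: rest, acc => (acc + c) :: pvPfx rest (acc + c)

-- the hand-written 'while left <= right' binary search; mlist[mid] is always in range
-- on the reachable states (0 ≤ left ≤ mid ≤ right < len), ported with pyGetD
def pvBSearch (mlist : List Int) (v : Int) (left right : Int) : Int :=
  if _h : left ≤ right then
    let mid := PySem.Int.floordiv (left + right) 2
    if PySem.List.pyGetD mlist mid 0 ≤ v then pvBSearch mlist v (mid + 1) right
    else pvBSearch mlist v left (mid - 1)
  else left
termination_by (right + 1 - left).toNat
decreasing_by
  all_goals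
    have h2 : Int.fdiv (left + right) 2 = (left + right) / 2 := by
      rw [Int.fdiv_eq_ediv]; simp
    simp only [PySem.Int.floordiv, h2] at *
    omega

def maximumCoins_1 (heroes : List Int) (monsters : List Int) (coins : List Int) : List Int :=
  let monsters_coins := PySem.List.sorted2 (List.zip monsters coins) (fun p => p.1) (fun p => p.2)
  let mlist := monsters_coins.map (fun p => p.1)
  let clist := monsters_coins.map (fun p => p.2)
  let pfx := pvPfx clist 0
  -- 'for i, v in enumerate(heroes)' with the index unused: fold over heroes appending one entry each
  heroes.foldl (fun res v =>
    let ind := pvBSearch mlist v 0 ((mlist.length : Int) - 1)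
    if ind = 0 then res ++ [0] else res ++ [PySem.List.pyGetD pfx (ind - 1) 0]) []

-- ===== PORT B =====
def maximumCoins_1_alt (heroes : List Int) (monsters : List Int) (coins : List Int) : List Int :=
  heroes.map (fun v => (List.zip monsters coins).foldl (fun s p => if p.1 ≤ v then s + p.2 else s) 0)

-- ===== PRECONDITION & SPEC =====
def Spec_maximumCoins_1 (heroes : List Int) (monsters : List Int) (coins : List Int) (out : List Int) : Prop := out = maximumCoins_1_alt heroes monsters coins
instance (heroes : List Int) (monsters : List Int) (coins : List Int) (out : List Int) : Decidable (Spec_maximumCoins_1 heroes monsters coins out) := by unfold Spec_maximumCoins_1; infer_instance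

-- ===== CLAIM (what is proved, stated in full; the proofs are below) =====
def Claim_equal_maximumCoins_1 : Prop := ∀ (heroes : List Int) (monsters : List Int) (coins : List Int), Dom_maximumCoins_1 heroes monsters coins → Spec_maximumCoins_1 heroes monsters coins (maximumCoins_1 heroes monsters coins)

-- ===== LEMMAS AND PROOFS =====

-- sorted2 by (fst, snd) is pairwise nondecreasing in fst
theorem pv_insertBy_pairwise (x : Int × Int) :
    ∀ (ys : List (Int × Int)), ys.Pairwise (fun a b => a.1 ≤ b.1) →
    (PySem.List.insertBy
        (fun a b => decide (a.1 < b.1) || (!decide (b.1 < a.1) && decide (a.2 < b.2)))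
        x ys).Pairwise (fun a b => a.1 ≤ b.1) := by
  intro ys
  induction ys with
  | nil => intro _; simp [PySem.List.insertBy]
  | cons y t ih =>
    intro hp
    rw [List.pairwise_cons] at hp
    simp only [PySem.List.insertBy]
    by_cases hb : (decide (x.1 < y.1) || (!decide (y.1 < x.1) && decide (x.2 < y.2))) = true
    · rw [if_pos hb]
      have hxy : x.1 ≤ y.1 := by
        simp only [Bool.or_eq_true, Bool.and_eq_true, Bool.not_eq_true', decide_eq_true_eq,
          decide_eq_false_iff_not] at hb
        rcases hb with h | ⟨h, _⟩ <;> omega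
      refine List.Pairwise.cons ?_ (List.Pairwise.cons hp.1 hp.2)
      intro z hz
      rcases List.mem_cons.mp hz with rfl | hz
      · exact hxy
      · exact le_trans hxy (hp.1 z hz)
    · rw [if_neg hb]
      have hyx : y.1 ≤ x.1 := by
        simp only [Bool.or_eq_true, Bool.and_eq_true, Bool.not_eq_true', decide_eq_true_eq,
          decide_eq_false_iff_not, not_or, not_and] at hb
        omega
      refine List.Pairwise.cons ?_ (ih hp.2)
      intro z hz
      rcases (PySem.List.mem_insertBy _ _ _ _).mp hz with rfl | hz
      · exact hyx
      · exact hp.1 z hz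

theorem pv_sorted2_fst_pairwise (l : List (Int × Int)) :
    (PySem.List.sorted2 l (fun p => p.1) (fun p => p.2)).Pairwise (fun a b => a.1 ≤ b.1) := by
  have he : PySem.List.sorted2 l (fun p => p.1) (fun p => p.2)
      = List.foldl (fun acc x => PySem.List.insertBy
          (fun a b => decide (a.1 < b.1) || (!decide (b.1 < a.1) && decide (a.2 < b.2))) x acc) [] l := rfl
  rw [he]
  have main : ∀ (l acc : List (Int × Int)), acc.Pairwise (fun a b => a.1 ≤ b.1) →
      (List.foldl (fun acc x => PySem.List.insertBy
          (fun a b => decide (a.1 < b.1) || (!decide (b.1 < a.1) && decide (a.2 < b.2))) x acc) acc l).Pairwise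
        (fun a b => a.1 ≤ b.1) := by
    intro l
    induction l with
    | nil => intro acc h; exact h
    | cons a t ih => intro acc h; exact ih _ (pv_insertBy_pairwise a acc h)
  exact main l [] (by simp)

-- prefix sums: the j-th entry of pvPfx c acc is acc + sum of the first j+1 entries of c
theorem pvPfx_getD (c : List Int) (acc : Int) (j : Nat) (hj : j < c.length) :
    (pvPfx c acc).getD j 0 = acc + (c.take (j + 1)).sum := by
  induction c generalizing acc j with
  | nil => simp at hj
  | cons a t ih =>
    cases j with
    | zero => simp [pvPfx]
    | succ j' =>
      simp only [pvPfx, List.getD_cons_succ, List.take_succ_cons, List.sum_cons]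
      rw [ih (acc + a) j' (by simpa using hj)]
      ring

-- the boundary characterisation of a nondecreasing list against v
theorem pv_takeWhile_char (v : Int) (l : List Int) (hl : l.Pairwise (· ≤ ·)) :
    ∀ i (h : i < l.length),
      (l[i] ≤ v ↔ i < (l.takeWhile (fun m => decide (m ≤ v))).length) := by
  induction l with
  | nil => intro i h; simp at h
  | cons a t ih =>
    intro i h
    rw [List.pairwise_cons] at hl
    by_cases ha : a ≤ v
    · cases i with
      | zero => simp [ha]
      | succ i' =>
        have hiff := ih hl.2 i' (by simpa using h)
        simp only [List.getElem_cons_succ]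
        simp [ha, hiff]
    · cases i with
      | zero => simp [ha]
      | succ i' =>
        simp only [List.getElem_cons_succ]
        simp [ha]
        exact lt_of_lt_of_le (not_le.mp ha) (hl.1 _ (List.getElem_mem _))

-- the hand-written binary search returns the boundary k
theorem pvBSearch_eq (l : List Int) (v : Int) (k : Nat) (hk : k ≤ l.length)
    (hch : ∀ i (h : i < l.length), (l[i] ≤ v ↔ i < k)) :
    ∀ (left right : Int), 0 ≤ left → left ≤ (k : Int) → (k : Int) ≤ right + 1 →
      right ≤ (l.length : Int) - 1 → pvBSearch l v left right = (k : Int) := by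
  have H : ∀ (n : Nat) (left right : Int), (right + 1 - left).toNat ≤ n → 0 ≤ left →
      left ≤ (k : Int) → (k : Int) ≤ right + 1 → right ≤ (l.length : Int) - 1 →
      pvBSearch l v left right = (k : Int) := by
    intro n
    induction n with
    | zero =>
      intro left right hm h0 h1 h2 h3
      rw [pvBSearch, dif_neg (by omega)]
      omega
    | succ n ihn =>
      intro left right hm h0 h1 h2 h3
      rw [pvBSearch]
      by_cases hlr : left ≤ right
      · rw [dif_pos hlr]
        have hm2 : PySem.Int.floordiv (left + right) 2 = (left + right) / 2 := by
          unfold PySem.Int.floordiv; rw [Int.fdiv_eq_ediv]; simp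
        dsimp only
        rw [hm2]
        have hmb : left ≤ (left + right) / 2 ∧ (left + right) / 2 ≤ right := by omega
        have hrw := PySem.List.pyGetD_eq_getElem l (i := (left + right) / 2) 0 (by omega) (by omega)
        by_cases hc : PySem.List.pyGetD l ((left + right) / 2) 0 ≤ v
        · rw [if_pos hc]
          rw [hrw] at hc
          have hlt : ((left + right) / 2).toNat < k := (hch _ (by omega)).mp hc
          exact ihn ((left + right) / 2 + 1) right (by omega) (by omega) (by omega) h2 h3
        · rw [if_neg hc]
          rw [hrw] at hc
          have hge : ¬ ((left + right) / 2).toNat < k := fun hlt => hc ((hch _ (by omega)).mpr hlt)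
          exact ihn left ((left + right) / 2 - 1) (by omega) h0 h1 (by omega) (by omega)
      · rw [dif_neg hlr]
        omega
  intro left right h0 h1 h2 h3
  exact H (right + 1 - left).toNat left right le_rfl h0 h1 h2 h3

-- on a list pairwise-nondecreasing in fst, filtering (fst ≤ v) is a prefix
theorem pv_filter_eq_takeWhile (v : Int) (l : List (Int × Int))
    (hl : l.Pairwise (fun a b => a.1 ≤ b.1)) :
    l.filter (fun p => decide (p.1 ≤ v)) = l.takeWhile (fun p => decide (p.1 ≤ v)) := by
  induction l with
  | nil => rfl
  | cons a t ih =>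
    rw [List.pairwise_cons] at hl
    by_cases ha : a.1 ≤ v
    · simp [List.filter_cons, ha, ih hl.2]
    · simp only [List.filter_cons, List.takeWhile_cons]
      simp [ha]
      intro x y hxy
      exact lt_of_lt_of_le (not_le.mp ha) (hl.1 (x, y) hxy)

-- B's inner loop is the filtered sum
theorem pv_foldl_if_add (v : Int) (l : List (Int × Int)) (s : Int) :
    l.foldl (fun s p => if p.1 ≤ v then s + p.2 else s) s
      = s + ((l.filter (fun p => decide (p.1 ≤ v))).map (fun p => p.2)).sum := by
  induction l generalizing s with
  | nil => simp
  | cons a t ih =>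
    simp only [List.foldl_cons, List.filter_cons]
    by_cases ha : a.1 ≤ v
    · simp only [if_pos ha]
      rw [ih]
      simp [ha]
      ring
    · simp only [if_neg ha, decide_eq_false ha]
      exact ih s

-- per-hero value of A's loop body equals B's
theorem pv_perHero (v : Int) (monsters coins : List Int) :
    (let monsters_coins := PySem.List.sorted2 (List.zip monsters coins) (fun p => p.1) (fun p => p.2)
     let mlist := monsters_coins.map (fun p => p.1)
     let clist := monsters_coins.map (fun p => p.2)
     let pfx := pvPfx clist 0
     let ind := pvBSearch mlist v 0 ((mlist.length : Int) - 1)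
     if ind = 0 then (0 : Int) else PySem.List.pyGetD pfx (ind - 1) 0)
    = (List.zip monsters coins).foldl (fun s p => if p.1 ≤ v then s + p.2 else s) 0 := by
  dsimp only
  set sp := PySem.List.sorted2 (List.zip monsters coins) (fun p => p.1) (fun p => p.2) with hsp
  have hPW : sp.Pairwise (fun a b => a.1 ≤ b.1) := pv_sorted2_fst_pairwise _
  have hPWm : (sp.map (fun p => p.1)).Pairwise (fun a b : Int => a ≤ b) :=
    List.Pairwise.map _ (fun a b h => h) hPW
  -- the boundary index
  have htwmap : (sp.map (fun p => p.1)).takeWhile (fun m => decide (m ≤ v))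
      = (sp.takeWhile (fun q => decide (q.1 ≤ v))).map (fun p => p.1) := List.takeWhile_map
  set K : Nat := ((sp.map (fun p => p.1)).takeWhile (fun m => decide (m ≤ v))).length with hKdef
  have hKtw : K = (sp.takeWhile (fun q => decide (q.1 ≤ v))).length := by
    rw [hKdef, htwmap, List.length_map]
  have hKle : K ≤ sp.length := by
    rw [hKtw]
    simpa using (List.takeWhile_prefix (fun q => decide (q.1 ≤ v)) (l := sp)).length_le
  -- binary search returns K
  have hbs : pvBSearch (sp.map (fun p => p.1)) v 0 (((sp.map (fun p => p.1)).length : Int) - 1) = (K : Int) :=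
    pvBSearch_eq (sp.map (fun p => p.1)) v K (by simpa using hKle)
      (pv_takeWhile_char v _ hPWm) 0 _ le_rfl (by omega) (by simp; omega) (by simp)
  rw [hbs]
  -- B's side is the sum over the prefix of sp of length K
  have hperm : ((List.zip monsters coins).filter (fun q => decide (q.1 ≤ v))).Perm
      (sp.filter (fun q => decide (q.1 ≤ v))) :=
    ((PySem.List.sorted2_perm (List.zip monsters coins) (fun p => p.1) (fun p => p.2) false).filter _).symm
  have htake : sp.filter (fun q => decide (q.1 ≤ v)) = sp.take K := by
    rw [pv_filter_eq_takeWhile v sp hPW, hKtw]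
    exact List.prefix_iff_eq_take.mp (List.takeWhile_prefix _)
  have hB : (List.zip monsters coins).foldl (fun s p => if p.1 ≤ v then s + p.2 else s) 0
      = (((sp.map (fun p => p.2)).take K)).sum := by
    rw [pv_foldl_if_add, zero_add, (hperm.map (fun q => q.2)).sum_eq, htake, ← List.map_take]
  rw [hB]
  by_cases hK0 : (K : Int) = 0
  · rw [if_pos hK0]
    have : K = 0 := by omega
    simp [this]
  · rw [if_neg hK0]
    have hK1 : 1 ≤ K := by omega
    have hcast : (K : Int) - 1 = ((K - 1 : Nat) : Int) := by omega
    rw [hcast, PySem.List.pyGetD_natCast]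
    have hlen : K - 1 < (sp.map (fun p => p.2)).length := by simp; omega
    rw [show ((pvPfx (sp.map (fun p => p.2)) 0).getD (K - 1) 0)
        = 0 + ((sp.map (fun p => p.2)).take (K - 1 + 1)).sum from pvPfx_getD _ 0 (K - 1) hlen]
    rw [zero_add, Nat.sub_add_cancel hK1]

theorem pv_foldl_branch (mlist pfx : List Int) :
    ∀ (hs acc : List Int),
      hs.foldl (fun res v =>
        let ind := pvBSearch mlist v 0 ((mlist.length : Int) - 1)
        if ind = 0 then res ++ [0] else res ++ [PySem.List.pyGetD pfx (ind - 1) 0]) acc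
      = acc ++ hs.map (fun v =>
          let ind := pvBSearch mlist v 0 ((mlist.length : Int) - 1)
          if ind = 0 then (0 : Int) else PySem.List.pyGetD pfx (ind - 1) 0) := by
  intro hs
  induction hs with
  | nil => intro acc; simp
  | cons a t ih =>
    intro acc
    simp only [List.foldl_cons, List.map_cons]
    split_ifs with h
    · rw [ih]; simp
    · rw [ih]; simp

-- ===== VERDICT (by name: the statement is the Claim_ definition above) =====
theorem maximumCoins_1_spec : Claim_equal_maximumCoins_1 := by
  intro heroes monsters coins _
  unfold Spec_maximumCoins_1 maximumCoins_1 maximumCoins_1_alt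
  dsimp only
  rw [pv_foldl_branch]
  simp only [List.nil_append]
  exact List.map_congr_left (fun v _ => pv_perHero v monsters coins)
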